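-- pv_equiv track=rewrite | github.com/venupagilla/Autonomous-Research-Paper-Analyzer | src/autonomous_research_paper_analyzer_v2/api.py | _prioritize_recent_papers
-- ===== SOURCE A (Python) =====
-- from typing import Any
--
-- def _parse_year(published_value: Any) -> int:
--     if not published_value:
--         return 0
--
--     text = str(published_value).strip()
--     if len(text) >= 4 and text[:4].isdigit():
--         return int(text[:4])
--
--     return 0
--
-- def _parse_score(score_value: Any) -> int:
--     try:
--         return int(score_value)
--     except (TypeError, ValueError):
--         return 0
--
-- def _prioritize_recent_papers(papers: list[Any], max_papers: int, current_year: int) -> list[Any]: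
--     if not papers:
--         return []
--
--     recent_start_year = current_year - 3
--
--     def paper_sort_key(paper: Any) -> tuple[int, int]:
--         year = _parse_year((paper or {}).get("published"))
--         score = _parse_score((paper or {}).get("relevance_score"))
--         return (year, score)
--
--     recent_papers: list[Any] = []
--     older_papers: list[Any] = []
--
--     for paper in papers:
--         year = _parse_year((paper or {}).get("published"))
--         if year >= recent_start_year:
--             recent_papers.append(paper)
--         else:
--             older_papers.append(paper)
--
--     recent_papers.sort(key=paper_sort_key, reverse=True)
--     older_papers.sort(key=paper_sort_key, reverse=True)
--
--     selected = recent_papers[:max_papers]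
--     if len(selected) < max_papers:
--         selected.extend(older_papers[: max_papers - len(selected)])
--
--     return selected
-- ===== SOURCE B (Python) =====
-- from typing import Any
--
--
-- def _parse_year(published_value: Any) -> int:
--     if not published_value:
--         return 0
--
--     text = str(published_value).strip()
--     if len(text) >= 4 and text[:4].isdigit():
--         return int(text[:4])
--
--     return 0
--
--
-- def _parse_score(score_value: Any) -> int:
--     try:
--         return int(score_value)
--     except (TypeError, ValueError):
--         return 0
--
--
-- def _prioritize_recent_papers(papers: list[Any], max_papers: int, current_year: int) -> list[Any]:
--     # The recent/older bucketing is redundant: every paper in the recent bucket has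
--     # year >= current_year - 3 and every older one a strictly smaller year, so the
--     # (year, score) order alone already puts all recent papers first.  Instead of
--     # sorting anything, repeatedly extract the best remaining paper until enough
--     # papers are selected or none remain.
--     remaining = list(papers)
--     selected: list[Any] = []
--     while remaining and len(selected) < max_papers:
--         best = max(
--             remaining,
--             key=lambda p: (
--                 _parse_year((p or {}).get("published")),
--                 _parse_score((p or {}).get("relevance_score")),
--             ),
--         )
--         remaining.remove(best)
--         selected.append(best)
--     return selected
-- ===== Notes on version B (the rewrite author's own statement) =====
-- stated objective: alternative
-- what changed: B never partitions and never sorts: it repeatedly extracts the first-maximal remaining paper by (year, score) until max_papers are selected or none remain, relying on the fact that every recent-bucket year exceeds every older-bucket year, which makes A's bucket flag redundant. Pre_ excludes only the accidental corner where a negative max_papers meets more than |max_papers| recent papers, on which A's negative slice keeps part of the recent bucket while B selects nothing.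
-- outside the precondition, e.g. on _prioritize_recent_papers([{}, {'': ''}], -1, -1): A returns [{}], B returns []
import Mathlib
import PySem

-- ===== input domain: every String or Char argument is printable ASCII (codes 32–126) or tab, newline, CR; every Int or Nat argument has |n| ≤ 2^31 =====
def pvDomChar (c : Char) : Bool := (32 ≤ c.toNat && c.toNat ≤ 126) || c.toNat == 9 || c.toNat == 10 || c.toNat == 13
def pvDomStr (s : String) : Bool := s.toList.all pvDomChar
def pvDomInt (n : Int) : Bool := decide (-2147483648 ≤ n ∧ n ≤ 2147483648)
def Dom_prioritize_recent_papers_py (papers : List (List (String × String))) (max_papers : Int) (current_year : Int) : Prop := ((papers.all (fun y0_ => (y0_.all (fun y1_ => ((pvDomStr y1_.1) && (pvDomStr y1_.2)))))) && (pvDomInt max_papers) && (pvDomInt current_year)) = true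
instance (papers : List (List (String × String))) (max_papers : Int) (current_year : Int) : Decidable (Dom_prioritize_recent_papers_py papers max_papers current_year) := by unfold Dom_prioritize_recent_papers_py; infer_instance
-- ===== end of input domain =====

-- B replaces A's partition + two sorts + conditional extend by repeated extraction of the
-- first-maximal remaining paper under (year, score) — no sort at all (objective: alternative).

-- ===== PORT A =====
-- shared same-module helpers (used verbatim by both Pythons)

-- _parse_year: the value is Optional[str]; '' and None are falsy; int(text[:4]) on a
-- 4-digit string cannot raise, so getD 0 is never the raising branch
def parse_year_py (v : Option String) : Int :=
  match v with
  | none => 0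
  | some s =>
    if s = "" then 0
    else
      let text := PySem.Str.strip s
      if 4 ≤ PySem.Str.len text && PySem.Str.strIsdigit (PySem.Str.slice text none (some 4))
      then (PySem.Int.ofStr? (PySem.Str.slice text none (some 4))).getD 0
      else 0

-- _parse_score: int(None) / int(bad str) is caught and becomes 0
def parse_score_py (v : Option String) : Int :=
  match v with
  | none => 0
  | some s => (PySem.Int.ofStr? s).getD 0

-- _parse_year((paper or {}).get("published")); '{} or paper' only swaps in an empty dict,
-- whose .get is none, exactly what get? on the empty list gives
def yearOf (p : List (String × String)) : Int :=
  parse_year_py ((PySem.Dict.mk p).get? "published")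

def scoreOf (p : List (String × String)) : Int :=
  parse_score_py ((PySem.Dict.mk p).get? "relevance_score")

def prioritize_recent_papers_py (papers : List (List (String × String))) (max_papers : Int) (current_year : Int) : List (List (String × String)) :=
  if papers = [] then []
  else
    let recent_start_year := current_year - 3
    -- the for-loop appending to recent_papers / older_papers
    let part := papers.foldl
      (fun (acc : List (List (String × String)) × List (List (String × String))) paper =>
        if recent_start_year ≤ yearOf paper then (acc.1 ++ [paper], acc.2)
        else (acc.1, acc.2 ++ [paper])) ([], [])
    let recent_sorted := PySem.List.sorted2 part.1 yearOf scoreOf true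
    let older_sorted := PySem.List.sorted2 part.2 yearOf scoreOf true
    let selected := PySem.List.slice recent_sorted none (some max_papers)
    if (selected.length : Int) < max_papers then
      selected ++ PySem.List.slice older_sorted none (some (max_papers - selected.length))
    else selected

-- ===== PORT B =====
-- the while-loop: 'while remaining and len(selected) < max_papers: best = max(remaining,
-- key=(year, score)); remaining.remove(best); selected.append(best)'; max with a tuple key
-- is PySem.List.max2? (first extremal element), remove is PySem.List.remove? (never none
-- here since best ∈ remaining)
def selLoopB (max_papers : Int) (remaining selected : List (List (String × String))) : List (List (String × String)) :=
  if remaining = [] ∨ max_papers ≤ (selected.length : Int) then selected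
  else
    match PySem.List.max2? remaining yearOf scoreOf with
    | none => selected
    | some best =>
      match hr : PySem.List.remove? remaining best with
      | none => selected
      | some rest => selLoopB max_papers rest (selected ++ [best])
termination_by remaining.length
decreasing_by
  have hmem : best ∈ remaining := by
    by_contra hnm
    rw [(PySem.List.remove?_eq_none_iff remaining best).mpr hnm] at hr
    exact absurd hr (by simp)
  have heq : some (remaining.erase best) = some rest :=
    (PySem.List.remove?_eq_some_erase remaining best hmem).symm.trans hr
  injection heq with hrest
  have h1 : 0 < remaining.length := List.length_pos_of_mem hmem
  have h2 := List.length_erase_of_mem hmem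
  rw [hrest] at h2
  omega

def prioritize_recent_papers_py_alt (papers : List (List (String × String))) (max_papers : Int) (current_year : Int) : List (List (String × String)) :=
  selLoopB max_papers papers []

-- ===== PRECONDITION & SPEC =====
-- Pre_ excludes only the accidental corner where a negative max_papers meets more than
-- |max_papers| recent-bucket papers: there A's negative slice returns the recent list minus
-- its tail while B selects nothing — both readings of a negative cap are defensible and
-- unspecified.
def Pre_prioritize_recent_papers_py (papers : List (List (String × String))) (max_papers : Int) (current_year : Int) : Prop :=
  0 ≤ max_papers ∨
    ((papers.countP (fun p => decide (current_year - 3 ≤ yearOf p)) : Int) ≤ -max_papers)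
instance (papers : List (List (String × String))) (max_papers : Int) (current_year : Int) : Decidable (Pre_prioritize_recent_papers_py papers max_papers current_year) := by unfold Pre_prioritize_recent_papers_py; infer_instance

def pvWitness_prioritize_recent_papers_py : (List (List (String × String))) × Int × Int :=
  ([[("published", "2024"), ("relevance_score", "7")], [("published", "2000")]], 1, 2024)

def Spec_prioritize_recent_papers_py (papers : List (List (String × String))) (max_papers : Int) (current_year : Int) (out : List (List (String × String))) : Prop := out = prioritize_recent_papers_py_alt papers max_papers current_year
instance (papers : List (List (String × String))) (max_papers : Int) (current_year : Int) (out : List (List (String × String))) : Decidable (Spec_prioritize_recent_papers_py papers max_papers current_year out) := by unfold Spec_prioritize_recent_papers_py; infer_instance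

-- ===== CLAIM (what is proved, stated in full; the proofs are below) =====
def Claim_equal_prioritize_recent_papers_py : Prop := ∀ (papers : List (List (String × String))) (max_papers : Int) (current_year : Int), Dom_prioritize_recent_papers_py papers max_papers current_year → Pre_prioritize_recent_papers_py papers max_papers current_year → Spec_prioritize_recent_papers_py papers max_papers current_year (prioritize_recent_papers_py papers max_papers current_year)

-- ===== LEMMAS AND PROOFS =====

-- the strict lexicographic 'comes strictly earlier' relation of the reverse=True (year, score) order
def pvBefore (a b : List (String × String)) : Bool :=
  decide (yearOf b < yearOf a) || (!decide (yearOf a < yearOf b) && decide (scoreOf b < scoreOf a))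

-- the insertion sort both of A's list.sort calls perform, as a plain foldl
def pvIsort (l : List (List (String × String))) : List (List (String × String)) :=
  l.foldl (fun acc x => PySem.List.insertBy pvBefore x acc) []

theorem pvBefore_irrefl (a : List (String × String)) : pvBefore a a = false := by
  simp [pvBefore]

theorem pvBefore_asymm {a b : List (String × String)} (h : pvBefore a b = true) : pvBefore b a = false := by
  simp [pvBefore] at *; omega

theorem pvBefore_trans {a b c : List (String × String)} (h1 : pvBefore a b = true)
    (h2 : pvBefore b c = true) : pvBefore a c = true := by
  simp [pvBefore] at *; omega

theorem pvBefore_trans_not {a b c : List (String × String)} (h : pvBefore a b = true)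
    (h2 : pvBefore c b = false) : pvBefore a c = true := by
  simp [pvBefore] at *; omega

theorem sorted2_true_eq (xs : List (List (String × String))) :
    PySem.List.sorted2 xs yearOf scoreOf true = pvIsort xs := rfl

-- membership in the insertion-sort fold
theorem mem_foldl_insertBy {z : List (String × String)} (xs acc : List (List (String × String)))
    (h : z ∈ xs.foldl (fun acc x => PySem.List.insertBy pvBefore x acc) acc) :
    z ∈ acc ∨ z ∈ xs := by
  induction xs generalizing acc with
  | nil => exact Or.inl h
  | cons x xs ih =>
    rcases ih _ h with hm | hm
    · rcases (PySem.List.mem_insertBy pvBefore x z acc).mp hm with rfl | hm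
      · simp
      · exact Or.inl hm
    · simp [hm]

-- insertBy keeps the accumulator sorted (no later element strictly before an earlier one)
theorem insertBy_pairwise (x : List (String × String)) (ys : List (List (String × String)))
    (h : ys.Pairwise (fun a b => pvBefore b a = false)) :
    (PySem.List.insertBy pvBefore x ys).Pairwise (fun a b => pvBefore b a = false) := by
  induction ys with
  | nil => simp [PySem.List.insertBy]
  | cons y ys ih =>
    rw [List.pairwise_cons] at h
    by_cases hb : pvBefore x y = true
    · simp only [PySem.List.insertBy, hb, if_pos]
      refine List.Pairwise.cons ?_ (List.Pairwise.cons h.1 h.2)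
      intro z hz
      rcases List.mem_cons.mp hz with rfl | hz
      · exact pvBefore_asymm hb
      · exact pvBefore_asymm (pvBefore_trans_not hb (h.1 z hz))
    · simp only [PySem.List.insertBy, hb, if_neg, Bool.false_eq_true, not_false_iff]
      refine List.Pairwise.cons ?_ (ih h.2)
      intro z hz
      rcases (PySem.List.mem_insertBy pvBefore x z ys).mp hz with rfl | hz
      · simpa using hb
      · exact h.1 z hz

theorem pairwise_foldl_insertBy (xs acc : List (List (String × String)))
    (h : acc.Pairwise (fun a b => pvBefore b a = false)) :
    (xs.foldl (fun acc x => PySem.List.insertBy pvBefore x acc) acc).Pairwise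
      (fun a b => pvBefore b a = false) := by
  induction xs generalizing acc with
  | nil => exact h
  | cons x xs ih => exact ih _ (insertBy_pairwise x acc h)

theorem pairwise_pvIsort (xs : List (List (String × String))) :
    (pvIsort xs).Pairwise (fun a b => pvBefore b a = false) :=
  pairwise_foldl_insertBy xs [] (by simp)

-- inserting before a list whose head (if any) comes strictly after x just conses
theorem insertBy_cons_of_head (x : List (String × String)) (l : List (List (String × String)))
    (h : ∀ z ∈ l.head?, pvBefore x z = true) :
    PySem.List.insertBy pvBefore x l = x :: l := by
  cases l with
  | nil => simp [PySem.List.insertBy]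
  | cons z zs => simp [PySem.List.insertBy, h z (by simp)]

-- filtering commutes with inserting into a sorted accumulator
theorem filter_insertBy (p : List (String × String) → Bool) (x : List (String × String))
    (ys : List (List (String × String)))
    (h : ys.Pairwise (fun a b => pvBefore b a = false)) :
    (PySem.List.insertBy pvBefore x ys).filter p =
      if p x then PySem.List.insertBy pvBefore x (ys.filter p) else ys.filter p := by
  induction ys with
  | nil => by_cases hp : p x <;> simp [PySem.List.insertBy, hp]
  | cons y ys ih =>
    rw [List.pairwise_cons] at h
    by_cases hb : pvBefore x y = true
    · simp only [PySem.List.insertBy, hb, if_pos]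
      by_cases hp : p x
      · rw [if_pos hp, show (x :: y :: ys).filter p = x :: (y :: ys).filter p from by
          rw [List.filter_cons, if_pos hp]]
        rw [insertBy_cons_of_head]
        intro z hz
        rcases List.mem_cons.mp (List.mem_of_mem_filter (List.mem_of_mem_head? hz)) with rfl | hm
        · exact hb
        · exact pvBefore_trans_not hb (h.1 z hm)
      · rw [if_neg hp, show (x :: y :: ys).filter p = (y :: ys).filter p from by
          rw [List.filter_cons, if_neg hp]]
    · simp only [PySem.List.insertBy, hb, if_neg, Bool.false_eq_true, not_false_iff]
      by_cases hp : p x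
      · by_cases hpy : p y
        · simp [hpy, hp, PySem.List.insertBy, hb, ih h.2]
        · simp [hpy, hp, ih h.2]
      · by_cases hpy : p y <;> simp [hpy, hp, ih h.2]

-- filtering commutes with the whole insertion sort
theorem filter_foldl_insertBy (p : List (String × String) → Bool)
    (xs acc : List (List (String × String)))
    (h : acc.Pairwise (fun a b => pvBefore b a = false)) :
    (xs.foldl (fun acc x => PySem.List.insertBy pvBefore x acc) acc).filter p =
      (xs.filter p).foldl (fun acc x => PySem.List.insertBy pvBefore x acc) (acc.filter p) := by
  induction xs generalizing acc with
  | nil => simp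
  | cons x xs ih =>
    simp only [List.foldl_cons, List.filter_cons]
    rw [ih _ (insertBy_pairwise x acc h), filter_insertBy p x acc h]
    by_cases hp : p x <;> simp [hp]

theorem filter_pvIsort (p : List (String × String) → Bool) (xs : List (List (String × String))) :
    (pvIsort xs).filter p = pvIsort (xs.filter p) := by
  unfold pvIsort
  rw [filter_foldl_insertBy p xs [] (by simp)]
  rfl

-- A's partition loop computes the two filters
theorem partition_foldl (t : Int) (xs : List (List (String × String)))
    (a b : List (List (String × String))) :
    xs.foldl (fun (acc : List (List (String × String)) × List (List (String × String))) paper =>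
        if t ≤ yearOf paper then (acc.1 ++ [paper], acc.2) else (acc.1, acc.2 ++ [paper])) (a, b) =
      (a ++ xs.filter (fun p => decide (t ≤ yearOf p)), b ++ xs.filter (fun p => decide (yearOf p < t))) := by
  induction xs generalizing a b with
  | nil => simp
  | cons x xs ih =>
    simp only [List.foldl_cons, List.filter_cons]
    by_cases hx : t ≤ yearOf x
    · have hx' : ¬ yearOf x < t := by omega
      simp [hx, hx', ih]
    · have hx' : yearOf x < t := by omega
      simp [hx, hx', ih]

-- on a descending-sorted list the recent block wholly precedes the older block,
-- so the stable recent/older split reassembles to the list itself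
theorem filter_partition (t : Int) (S : List (List (String × String)))
    (h : S.Pairwise (fun a b => pvBefore b a = false)) :
    S.filter (fun p => decide (t ≤ yearOf p)) ++ S.filter (fun p => decide (yearOf p < t)) = S := by
  induction S with
  | nil => simp
  | cons x xs ih =>
    rw [List.pairwise_cons] at h
    by_cases hx : t ≤ yearOf x
    · have hx' : ¬ yearOf x < t := by omega
      simp only [List.filter_cons, hx, hx', decide_true, decide_false, if_pos, if_neg,
        Bool.false_eq_true, not_false_iff, List.cons_append]
      rw [ih h.2]
    · have hx' : yearOf x < t := by omega
      have hall : ∀ b ∈ xs, ¬ (t ≤ yearOf b) := by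
        intro b hb hbt
        have := h.1 b hb
        simp [pvBefore] at this
        omega
      have h1 : xs.filter (fun p => decide (t ≤ yearOf p)) = [] := by
        rw [List.filter_eq_nil_iff]
        intro b hb
        simpa using hall b hb
      have h2 : xs.filter (fun p => decide (yearOf p < t)) = xs := by
        rw [List.filter_eq_self]
        intro b hb
        have := hall b hb
        simp; omega
      simp only [List.filter_cons, hx, hx', decide_true, decide_false, if_neg, if_pos,
        Bool.false_eq_true, not_false_iff, h1, h2, List.nil_append]

-- ===== the max2? characterization: the first extremal element splits the list =====

-- the fold max2? performs, with the comparison written via pvBefore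
def pvMaxStep (acc : Option (List (String × String))) (x : List (String × String)) :
    Option (List (String × String)) :=
  match acc with
  | none => some x
  | some m => if pvBefore x m then some x else some m

theorem max2?_eq_foldl (l : List (List (String × String))) :
    PySem.List.max2? l yearOf scoreOf = l.foldl pvMaxStep none := by
  unfold PySem.List.max2?
  apply PySem.List.foldl_congr_mem
  intro acc x _
  cases acc <;> simp [pvMaxStep, pvBefore]

theorem maxAux (l : List (List (String × String))) :
    ∀ (m b : List (String × String)), l.foldl pvMaxStep (some m) = some b →
      (b = m ∧ ∀ c ∈ l, pvBefore c m = false) ∨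
      (pvBefore b m = true ∧ ∃ l1 l2, l = l1 ++ b :: l2 ∧
        (∀ a ∈ l1, pvBefore b a = true) ∧ (∀ c ∈ l2, pvBefore c b = false)) := by
  induction l with
  | nil =>
    intro m b h
    simp at h
    exact Or.inl ⟨h.symm, by simp⟩
  | cons x xs ih =>
    intro m b h
    simp only [List.foldl_cons] at h
    by_cases hx : pvBefore x m = true
    · rw [show pvMaxStep (some m) x = some x from by simp [pvMaxStep, hx]] at h
      rcases ih x b h with ⟨rfl, hall⟩ | ⟨hbx, l1, l2, rfl, h1, h2⟩
      · exact Or.inr ⟨hx, [], xs, rfl, by simp, hall⟩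
      · exact Or.inr ⟨pvBefore_trans hbx hx, x :: l1, l2, rfl,
          by intro a ha; rcases List.mem_cons.mp ha with rfl | ha; exact hbx; exact h1 a ha, h2⟩
    · rw [show pvMaxStep (some m) x = some m from by
        simp [pvMaxStep]; intro hc; exact absurd hc hx] at h
      rcases ih m b h with ⟨rfl, hall⟩ | ⟨hbm, l1, l2, rfl, h1, h2⟩
      · refine Or.inl ⟨rfl, ?_⟩
        intro c hc
        rcases List.mem_cons.mp hc with rfl | hc
        · exact eq_false_of_ne_true hx
        · exact hall c hc
      · exact Or.inr ⟨hbm, x :: l1, l2, rfl,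
          by intro a ha; rcases List.mem_cons.mp ha with rfl | ha;
             exact pvBefore_trans_not hbm (eq_false_of_ne_true hx); exact h1 a ha, h2⟩

theorem max2?_decomp {l : List (List (String × String))} {b : List (String × String)}
    (h : PySem.List.max2? l yearOf scoreOf = some b) :
    ∃ l1 l2, l = l1 ++ b :: l2 ∧
      (∀ a ∈ l1, pvBefore b a = true) ∧ (∀ c ∈ l2, pvBefore c b = false) := by
  rw [max2?_eq_foldl] at h
  cases l with
  | nil => simp at h
  | cons x xs =>
    simp only [List.foldl_cons] at h
    rw [show pvMaxStep none x = some x from rfl] at h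
    rcases maxAux xs x b h with ⟨rfl, hall⟩ | ⟨hbx, l1, l2, rfl, h1, h2⟩
    · exact ⟨[], xs, rfl, by simp, hall⟩
    · exact ⟨x :: l1, l2, rfl,
        by intro a ha; rcases List.mem_cons.mp ha with rfl | ha; exact hbx; exact h1 a ha, h2⟩

theorem max2?_ne_none (x : List (String × String)) (xs : List (List (String × String))) :
    PySem.List.max2? (x :: xs) yearOf scoreOf ≠ none := by
  rw [max2?_eq_foldl]
  simp only [List.foldl_cons]
  rw [show pvMaxStep none x = some x from rfl]
  induction xs generalizing x with
  | nil => simp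
  | cons y ys ih =>
    simp only [List.foldl_cons]
    by_cases hy : pvBefore y x = true
    · rw [show pvMaxStep (some x) y = some y from by simp [pvMaxStep, hy]]; exact ih y
    · rw [show pvMaxStep (some x) y = some x from by
        simp [pvMaxStep]; intro hc; exact absurd hc hy]; exact ih x

theorem pvEraseIdx_append (l1 l2 : List (List (String × String))) (b : List (String × String)) :
    (l1 ++ b :: l2).eraseIdx l1.length = l1 ++ l2 := by
  induction l1 with
  | nil => simp
  | cons a l1 ih => simp [ih]

-- removing the first extremal element removes exactly it
theorem remove?_decomp (l1 l2 : List (List (String × String))) (b : List (String × String))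
    (h1 : ∀ a ∈ l1, pvBefore b a = true) :
    PySem.List.remove? (l1 ++ b :: l2) b = some (l1 ++ l2) := by
  have hnm : b ∉ l1 := by
    intro hm
    have := h1 b hm
    rw [pvBefore_irrefl] at this
    exact absurd this (by simp)
  have hidx : PySem.List.index? (l1 ++ b :: l2) b = some l1.length :=
    (PySem.List.index?_eq_some_iff _ _ _).mpr ⟨l1, l2, rfl, rfl, hnm⟩
  rw [PySem.List.index?_eq_idxOf?] at hidx
  unfold PySem.List.remove?
  rw [hidx]
  simp only [Option.map_some, Option.some.injEq]
  exact pvEraseIdx_append l1 l2 b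

-- ===== the insertion sort of a first-max decomposition conses the max =====

theorem foldl_insertBy_cons (b : List (String × String)) (l2 : List (List (String × String)))
    (h2 : ∀ c ∈ l2, pvBefore c b = false) :
    ∀ acc, l2.foldl (fun acc x => PySem.List.insertBy pvBefore x acc) (b :: acc) =
      b :: l2.foldl (fun acc x => PySem.List.insertBy pvBefore x acc) acc := by
  induction l2 with
  | nil => intro acc; rfl
  | cons c l2 ih =>
    intro acc
    simp only [List.foldl_cons]
    rw [show PySem.List.insertBy pvBefore c (b :: acc) = b :: PySem.List.insertBy pvBefore c acc from by
      simp [PySem.List.insertBy, h2 c (by simp)]]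
    exact ih (fun x hx => h2 x (List.mem_cons_of_mem c hx)) _

theorem pvIsort_decomp (l1 l2 : List (List (String × String))) (b : List (String × String))
    (h1 : ∀ a ∈ l1, pvBefore b a = true) (h2 : ∀ c ∈ l2, pvBefore c b = false) :
    pvIsort (l1 ++ b :: l2) = b :: pvIsort (l1 ++ l2) := by
  unfold pvIsort
  rw [List.foldl_append, List.foldl_append, List.foldl_cons]
  rw [show PySem.List.insertBy pvBefore b
        (l1.foldl (fun acc x => PySem.List.insertBy pvBefore x acc) []) =
      b :: l1.foldl (fun acc x => PySem.List.insertBy pvBefore x acc) [] from by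
    apply insertBy_cons_of_head
    intro z hz
    have hm := List.mem_of_mem_head? hz
    rcases mem_foldl_insertBy l1 [] hm with hc | hc
    · simp at hc
    · exact h1 z hc]
  exact foldl_insertBy_cons b l2 h2 _

-- ===== B's selection loop takes a prefix of the insertion sort =====

theorem selLoopB_eq_aux (m : Int) : ∀ (n : Nat) (l out : List (List (String × String))),
    l.length = n →
    selLoopB m l out = out ++ List.take (m - out.length).toNat (pvIsort l) := by
  intro n
  induction n using Nat.strong_induction_on with
  | _ n ih =>
    intro l out hn
    rw [selLoopB.eq_def]
    split
    · next h =>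
      rcases h with rfl | hm
      · simp [pvIsort]
      · have : (m - (out.length : Int)).toNat = 0 := by omega
        simp [this]
    · next hne =>
      split
      · next hmax =>
        exfalso
        rcases not_or.mp hne with ⟨hl, _⟩
        cases l with
        | nil => exact hl rfl
        | cons x xs => exact max2?_ne_none x xs hmax
      · next best hmax =>
        split
        · next hrem =>
          exfalso
          obtain ⟨l1, l2, rfl, h1, h2⟩ := max2?_decomp hmax
          rw [remove?_decomp l1 l2 best h1] at hrem
          exact absurd hrem (by simp)
        · next rest hrem =>
          obtain ⟨l1, l2, rfl, h1, h2⟩ := max2?_decomp hmax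
          rw [remove?_decomp l1 l2 best h1] at hrem
          injection hrem with hrest
          subst hrest
          have hlen : (l1 ++ l2).length < n := by
            subst hn; simp
          rw [ih _ hlen (l1 ++ l2) (out ++ [best]) rfl, pvIsort_decomp l1 l2 best h1 h2]
          have hlt : (out.length : Int) < m := by
            rcases not_or.mp hne with ⟨_, h⟩
            omega
          have hk : (m - (out.length : Int)).toNat = (m - ((out.length : Int) + 1)).toNat + 1 := by
            omega
          rw [hk, List.take_succ_cons]
          simp

theorem selLoopB_eq (m : Int) (l out : List (List (String × String))) :
    selLoopB m l out = out ++ List.take (m - out.length).toNat (pvIsort l) :=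
  selLoopB_eq_aux m l.length l out rfl

-- ===== A returns a prefix of the very same insertion sort =====

theorem portA_eq_take (papers : List (List (String × String))) (m cy : Int) (hm : 0 ≤ m) :
    prioritize_recent_papers_py papers m cy = List.take m.toNat (pvIsort papers) := by
  unfold prioritize_recent_papers_py
  by_cases hnil : papers = []
  · subst hnil
    simp [pvIsort]
  · simp only [hnil, if_neg, not_false_iff]
    rw [partition_foldl]
    simp only [List.nil_append]
    rw [sorted2_true_eq, sorted2_true_eq, ← filter_pvIsort, ← filter_pvIsort]
    simp only [PySem.List.slice_to _ hm]
    set R := (pvIsort papers).filter (fun p => decide (cy - 3 ≤ yearOf p)) with hR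
    set O := (pvIsort papers).filter (fun p => decide (yearOf p < cy - 3)) with hO
    have hpart : R ++ O = pvIsort papers := filter_partition (cy - 3) _ (pairwise_pvIsort papers)
    rw [← hpart, List.take_append]
    simp only [List.length_take]
    by_cases hle : m.toNat ≤ R.length
    · rw [min_eq_left hle]
      have hcond : ¬ ((m.toNat : Int) < m) := by omega
      rw [if_neg hcond]
      have h0 : m.toNat - R.length = 0 := by omega
      rw [h0, List.take_zero, List.append_nil]
    · replace hle : R.length < m.toNat := Nat.lt_of_not_le hle
      rw [min_eq_right (le_of_lt hle)]
      have hcond : ((R.length : Int)) < m := by omega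
      rw [if_pos hcond, List.take_of_length_le (le_of_lt hle)]
      congr 1
      rw [PySem.List.slice_to _ (by omega : (0:Int) ≤ m - R.length)]
      congr 1
      omega

-- a slice whose negative stop reaches past the front is empty
theorem pvSlice_neg_nil {α : Type} (xs : List α) (m : Int) (h : m + xs.length ≤ 0) :
    PySem.List.slice xs none (some m) = [] := by
  simp [PySem.List.slice]
  left
  simp only [PySem.List.clampIdx]
  split
  · split
    · rfl
    · omega
  · omega

-- with a negative cap A never reaches the older bucket and, when the recent bucket holds at
-- most |m| papers, returns the empty list
theorem portA_neg (papers : List (List (String × String))) (m cy : Int) (hm : m < 0)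
    (hcnt : (papers.countP (fun p => decide (cy - 3 ≤ yearOf p)) : Int) ≤ -m) :
    prioritize_recent_papers_py papers m cy = [] := by
  unfold prioritize_recent_papers_py
  by_cases hnil : papers = []
  · simp [hnil]
  · simp only [hnil, if_neg, not_false_iff]
    rw [partition_foldl]
    simp only [List.nil_append]
    have hlenR : ((PySem.List.sorted2 (papers.filter (fun p => decide (cy - 3 ≤ yearOf p)))
        yearOf scoreOf true).length : Int) =
        (papers.countP (fun p => decide (cy - 3 ≤ yearOf p)) : Int) := by
      rw [(PySem.List.sorted2_perm _ _ _ _).length_eq, List.countP_eq_length_filter]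
    rw [pvSlice_neg_nil _ m (by omega)]
    simp only [List.length_nil, Nat.cast_zero]
    rw [if_neg (by omega)]

-- ===== VERDICT (by name: the statement is the Claim_ definition above) =====
theorem prioritize_recent_papers_py_spec : Claim_equal_prioritize_recent_papers_py := by
  intro papers max_papers current_year _ hpre
  unfold Spec_prioritize_recent_papers_py prioritize_recent_papers_py_alt
  by_cases hm : (0 : Int) ≤ max_papers
  · rw [portA_eq_take papers max_papers current_year hm, selLoopB_eq]
    simp
  · have hmneg : max_papers < 0 := by omega
    have hcnt := hpre.resolve_left hm
    rw [portA_neg papers max_papers current_year hmneg hcnt, selLoopB_eq]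
    simp
    omega
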